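-- pv_equiv track=rewrite | github.com/radishmouse/python-tic-tac-toe | tic-tac-toe.py | generate_diagonals
-- ===== SOURCE A (Python) =====
-- def generate_diagonals(board, other=False):
--     diag = []
--     if other:
--         y_range = range(len(board) - 1, -1, -1)
--     else:
--         y_range = range(len(board))
--
--     for y in y_range:
--         for x in range(len(board)):
--             diag.append((y, x))
--     return diag[::4]
-- ===== SOURCE B (Python) =====
-- def generate_diagonals(board, other=False):
--     # Direct closed-form selection: the k-th kept element is the coordinate at
--     # flat index i = 4*k of the row-major grid (rows descending when other).
--     n = len(board)
--     diag = []
--     for i in range(0, n * n, 4):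
--         r, c = divmod(i, n)
--         if other:
--             diag.append((n - 1 - r, c))
--         else:
--             diag.append((r, c))
--     return diag
-- ===== Notes on version B (the rewrite author's own statement) =====
-- stated objective: simpler
-- what changed: Instead of materialising the full n*n row-major coordinate list and slicing it with [::4], B computes each kept coordinate directly from its flat index i in range(0, n*n, 4) via divmod(i, n), negating the row as n-1-r in the descending case.
import Mathlib
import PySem

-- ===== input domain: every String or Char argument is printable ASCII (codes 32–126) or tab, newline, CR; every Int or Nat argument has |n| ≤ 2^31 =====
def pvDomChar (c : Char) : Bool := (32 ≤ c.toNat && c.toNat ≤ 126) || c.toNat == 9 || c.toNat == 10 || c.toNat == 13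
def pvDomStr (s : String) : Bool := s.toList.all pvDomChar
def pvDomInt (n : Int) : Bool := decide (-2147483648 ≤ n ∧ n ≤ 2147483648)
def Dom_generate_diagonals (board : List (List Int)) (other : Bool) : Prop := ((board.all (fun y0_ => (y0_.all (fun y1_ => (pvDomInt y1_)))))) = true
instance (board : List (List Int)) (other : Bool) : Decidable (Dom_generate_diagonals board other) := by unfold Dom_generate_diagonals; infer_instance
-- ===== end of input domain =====

-- B replaces A's full n×n coordinate build plus [::4] slice by directly generating the
-- kept coordinates from their flat indices 0, 4, 8, … via divmod (objective: simpler).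

-- ===== PORT A =====
def generate_diagonals (board : List (List Int)) (other : Bool) : List (Int × Int) :=
  let y_range : List Int :=
    if other then PySem.List.pyRange ((board.length : Int) - 1) (-1) (-1)
    else PySem.List.pyRange 0 (board.length : Int) 1
  let diag : List (Int × Int) :=
    y_range.foldl (fun acc y =>
      (PySem.List.pyRange 0 (board.length : Int) 1).foldl
        (fun acc2 x => acc2 ++ [(y, x)]) acc) []
  -- diag[::4]: the step is the literal 4 ≠ 0, so slice? is always `some`; getD makes it total
  (PySem.List.slice? diag none none 4).getD []

-- ===== PORT B =====
def generate_diagonals_alt (board : List (List Int)) (other : Bool) : List (Int × Int) :=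
  let n : Int := (board.length : Int)
  (PySem.List.pyRange 0 (n * n) 4).foldl
    (fun acc i =>
      -- r, c = divmod(i, n): the loop body only runs when the range is nonempty, i.e. n > 0,
      -- so Python's divmod never raises; floordiv/mod are its two components
      let r := PySem.Int.floordiv i n
      let c := PySem.Int.mod i n
      if other then acc ++ [(n - 1 - r, c)] else acc ++ [(r, c)]) []

-- ===== PRECONDITION & SPEC =====
def Spec_generate_diagonals (board : List (List Int)) (other : Bool) (out : List (Int × Int)) : Prop := out = generate_diagonals_alt board other
instance (board : List (List Int)) (other : Bool) (out : List (Int × Int)) : Decidable (Spec_generate_diagonals board other out) := by unfold Spec_generate_diagonals; infer_instance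

-- ===== CLAIM (what is proved, stated in full; the proofs are below) =====
def Claim_equal_generate_diagonals : Prop := ∀ (board : List (List Int)) (other : Bool), Dom_generate_diagonals board other → Spec_generate_diagonals board other (generate_diagonals board other)

-- ===== LEMMAS AND PROOFS =====

theorem pv_filterMap_eq_map {α β : Type} (f : α → Option β) (g : α → β) (l : List α)
    (h : ∀ a ∈ l, f a = some (g a)) : l.filterMap f = l.map g := by
  induction l with
  | nil => rfl
  | cons x xs ih =>
    simp [h x (List.mem_cons_self), ih (fun a ha => h a (List.mem_cons_of_mem _ ha))]

-- diag[::4] as an index selection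
theorem pv_slice4 (diag : List (Int × Int)) :
    (PySem.List.slice? diag none none 4).getD []
      = (List.range ((diag.length + 3) / 4)).filterMap (fun k => diag[4 * k]?) := by
  simp only [PySem.List.slice?, PySem.List.sliceIndices]
  norm_num
  by_cases h : 0 < diag.length
  · rw [if_pos (by exact_mod_cast h)]
    congr 2
    omega
  · rw [if_neg (by exact_mod_cast h)]
    have : diag.length = 0 := by omega
    simp [this]

theorem pv_grid_length (ys : List Int) (n : Nat) :
    (ys.flatMap (fun y => (PySem.List.pyRange 0 (n : Int) 1).map (fun x => (y, x)))).length
      = ys.length * n := by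
  induction ys with
  | nil => simp
  | cons y ys ih => simp [List.flatMap_cons, ih, PySem.List.length_pyRange_one, Nat.succ_mul, Nat.add_comm]

-- the i-th element of the row-major grid over rows ys is (ys[i/n], i%n)
theorem pv_grid_getElem? (ys : List Int) (n : Nat) (hn : 0 < n) (i : Nat) :
    (ys.flatMap (fun y => (PySem.List.pyRange 0 (n : Int) 1).map (fun x => (y, x))))[i]?
      = ys[i / n]?.map (fun y => (y, ((i % n : Nat) : Int))) := by
  induction ys generalizing i with
  | nil => simp
  | cons y ys ih =>
    rw [List.flatMap_cons]
    by_cases hi : i < n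
    · rw [List.getElem?_append_left (by simp [PySem.List.length_pyRange_one]; omega)]
      rw [List.getElem?_map, PySem.List.getElem?_pyRange_one]
      simp [Nat.div_eq_of_lt hi, Nat.mod_eq_of_lt hi]
      omega
    · rw [List.getElem?_append_right (by simp [PySem.List.length_pyRange_one]; omega)]
      have hlen : ((PySem.List.pyRange 0 (n:Int) 1).map (fun x => (y, x))).length = n := by
        simp [PySem.List.length_pyRange_one]
      rw [hlen, ih (i - n)]
      obtain ⟨j, rfl⟩ : ∃ j, i = n + j := ⟨i - n, by omega⟩
      have h1 : (n + j) - n = j := by omega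
      have h2 : (n + j) / n = j / n + 1 := by rw [Nat.add_comm]; exact Nat.add_div_right j hn
      have h3 : (n + j) % n = j % n := Nat.add_mod_left n j
      rw [h1, h2, h3, List.getElem?_cons_succ]

-- the double foldl of A builds the grid as a flatMap
theorem pv_fold_grid (ys : List Int) (n : Int) :
    ys.foldl (fun acc y =>
      (PySem.List.pyRange 0 n 1).foldl (fun acc2 x => acc2 ++ [(y, x)]) acc) ([] : List (Int × Int))
      = ys.flatMap (fun y => (PySem.List.pyRange 0 n 1).map (fun x => (y, x))) := by
  simp only [PySem.List.foldl_append_singleton_eq_map]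
  rw [PySem.List.foldl_append_eq_flatMap, List.nil_append]

-- ===== VERDICT (by name: the statement is the Claim_ definition above) =====
theorem generate_diagonals_spec : Claim_equal_generate_diagonals := by
  unfold Claim_equal_generate_diagonals Spec_generate_diagonals
  intro board other _
  by_cases hb : board.length = 0
  · cases other <;> simp only [generate_diagonals, generate_diagonals_alt, hb] <;> rfl
  · have hn : 0 < board.length := Nat.pos_of_ne_zero hb
    have hm : 0 < board.length * board.length := Nat.mul_pos hn hn
    -- B side: pyRange with step 4 as a map over List.range
    have hB : PySem.List.pyRange 0 ((board.length : Int) * (board.length : Int)) 4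
        = (List.range ((board.length * board.length + 3) / 4)).map (fun k => (0 : Int) + 4 * (k : Nat)) := by
      rw [PySem.List.pyRange_of_pos 0 ((board.length : Int) * (board.length : Int)) (by norm_num)]
      congr 2
      rw [if_pos (by exact_mod_cast hm)]
      omega
    cases other
    · -- ascending rows
      simp only [generate_diagonals, generate_diagonals_alt, Bool.false_eq_true, if_false]
      rw [pv_fold_grid, pv_slice4, hB, pv_grid_length, PySem.List.length_pyRange_one,
        show ((board.length : Int) - 0).toNat = board.length by omega,
        PySem.List.foldl_append_singleton_eq_map, List.nil_append, List.map_map]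
      apply pv_filterMap_eq_map
      intro k hk
      rw [List.mem_range] at hk
      have h4k : 4 * k < board.length * board.length := by omega
      rw [pv_grid_getElem? _ _ hn, PySem.List.getElem?_pyRange_one]
      have hdiv : 4 * k / board.length < board.length := (Nat.div_lt_iff_lt_mul hn).mpr h4k
      rw [if_pos (by omega)]
      simp only [Function.comp, Option.map_some]
      have hc : (0 : Int) + 4 * (k : Nat) = ((4 * k : Nat) : Int) := by push_cast; ring
      rw [hc, PySem.Int.floordiv_natCast, PySem.Int.mod_natCast]
      norm_num
    · -- descending rows
      simp only [generate_diagonals, generate_diagonals_alt, if_true]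
      rw [pv_fold_grid, pv_slice4, hB, pv_grid_length, PySem.List.pyRange_neg_one,
        List.length_map, List.length_range,
        show ((board.length : Int) - 1 - (-1)).toNat = board.length by omega,
        PySem.List.foldl_append_singleton_eq_map, List.nil_append, List.map_map]
      apply pv_filterMap_eq_map
      intro k hk
      rw [List.mem_range] at hk
      have h4k : 4 * k < board.length * board.length := by omega
      have hdiv : 4 * k / board.length < board.length := (Nat.div_lt_iff_lt_mul hn).mpr h4k
      rw [pv_grid_getElem? _ _ hn, List.getElem?_map, List.getElem?_range hdiv]
      simp only [Function.comp, Option.map_some]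
      have hc : (0 : Int) + 4 * (k : Nat) = ((4 * k : Nat) : Int) := by push_cast; ring
      rw [hc, PySem.Int.floordiv_natCast, PySem.Int.mod_natCast]
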